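-- pv_equiv track=rewrite | github.com/lcorbel/BridgeThesis | shadow_best_player_adapted.py | _compute_declarer
-- ===== SOURCE A (Python) =====
-- from typing import Dict, List, Optional, Tuple
--
-- SEATS = ["N", "E", "S", "W"]
--
-- def _dealer_index(seat: str) -> int:
--     """Get index of dealer seat."""
--     try:
--         return SEATS.index(seat.upper())
--     except:
--         return 0
--
-- def _is_contract_bid(tok: str) -> bool:
--     """Check if token is a contract bid."""
--     t = tok.upper()
--     return len(t) >= 2 and t[0] in "1234567" and t[1] in "CDHSN"
--
-- def _compute_declarer(dealer: str, bids: List[str]) -> str: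
--     """Compute the declarer from bidding sequence."""
--     d_idx = _dealer_index(dealer)
--     final_idx = None
--     final_strain = None
--     for i, tok in enumerate(bids):
--         if _is_contract_bid(tok):
--             final_idx = i
--             final_strain = tok[1].upper()
--     if final_idx is None or not final_strain:
--         return dealer.upper()
--
--     final_seat_idx = (d_idx + final_idx) % 4
--     final_side_parity = final_seat_idx % 2
--     for i, tok in enumerate(bids):
--         if _is_contract_bid(tok) and tok[1].upper() == final_strain:
--             seat_idx = (d_idx + i) % 4
--             if seat_idx % 2 == final_side_parity:
--                 return SEATS[seat_idx]
--     return SEATS[final_seat_idx]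
-- ===== SOURCE B (Python) =====
-- SEATS = ["N", "E", "S", "W"]
--
-- def _compute_declarer(dealer, bids):
--     """Single pass: index the first bid of each (strain, side-parity) key and
--     remember the last contract bid's key; one lookup gives the declarer."""
--     try:
--         d_idx = SEATS.index(dealer.upper())
--     except ValueError:
--         d_idx = 0
--     first_seen = {}
--     last = None
--     for i, tok in enumerate(bids):
--         t = tok.upper()
--         if len(t) >= 2 and t[0] in "1234567" and t[1] in "CDHSN":
--             key = (t[1], (d_idx + i) % 2)
--             if key not in first_seen:
--                 first_seen[key] = i
--             last = key
--     if last is None: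
--         return dealer.upper()
--     return SEATS[(d_idx + first_seen[last]) % 4]
-- ===== Notes on version B (the rewrite author's own statement) =====
-- stated objective: alternative
-- what changed: Replaces A's two scans over the bids (one to find the last contract bid, one to find the first contract bid of the same strain and side) by a single pass that records the last contract bid's (strain, side-parity) key and builds a first-occurrence index per key, followed by one dict lookup.
import Mathlib
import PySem

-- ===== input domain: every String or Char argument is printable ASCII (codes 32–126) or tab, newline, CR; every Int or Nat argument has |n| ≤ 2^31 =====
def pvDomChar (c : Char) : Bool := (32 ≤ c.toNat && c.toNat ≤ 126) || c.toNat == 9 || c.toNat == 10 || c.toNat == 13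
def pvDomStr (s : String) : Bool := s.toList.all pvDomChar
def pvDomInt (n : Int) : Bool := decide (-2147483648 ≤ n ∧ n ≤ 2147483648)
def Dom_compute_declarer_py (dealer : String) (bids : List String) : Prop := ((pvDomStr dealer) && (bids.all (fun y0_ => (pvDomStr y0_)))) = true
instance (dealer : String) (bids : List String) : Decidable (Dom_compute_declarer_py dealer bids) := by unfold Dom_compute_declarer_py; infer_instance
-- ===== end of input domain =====

-- B replaces A's two scans over the bids by one pass that indexes the first bid of each
-- (strain, side-parity) key in a dict and remembers the last contract bid's key (objective: alternative decomposition).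

-- ===== PORT A =====
-- module constant SEATS = ["N", "E", "S", "W"]
def pvSEATS : List String := ["N", "E", "S", "W"]

-- _dealer_index: SEATS.index(seat.upper()); the bare 'except' can only catch ValueError here -> 0
def dealer_index_py (seat : String) : Int :=
  match PySem.List.index? pvSEATS (PySem.Str.upper seat) with
  | some i => (i : Int)
  | none => 0

-- _is_contract_bid: len(t) >= 2 and t[0] in "1234567" and t[1] in "CDHSN" (short-circuit:
-- t[0]/t[1] are only read after the length test, so the 'none' branches are unreachable;
-- 'c in <string>' on the one-char string t[i] is exact)
def is_contract_bid_py (tok : String) : Bool :=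
  let t := PySem.Str.upper tok
  decide (2 ≤ PySem.Str.len t) &&
    (match PySem.Str.pyGet? t 0 with
     | some c => PySem.Str.isIn (String.ofList [c]) "1234567"
     | none => false) &&
    (match PySem.Str.pyGet? t 1 with
     | some c => PySem.Str.isIn (String.ofList [c]) "CDHSN"
     | none => false)

-- tok[1].upper(); A only evaluates it on contract bids, where tok[1] exists ([] = the unreachable IndexError)
def strain_py (tok : String) : List Char :=
  match PySem.Str.pyGet? tok 1 with
  | some c => PySem.Chars.upper [c]
  | none => []

-- body of A's first loop
def declarer_step_py (st : Option Int × Option (List Char)) (p : Int × String) :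
    Option Int × Option (List Char) :=
  if is_contract_bid_py p.2 then (some p.1, some (strain_py p.2)) else st

-- A's second loop, with its early return; the SEATS[...] indices are 0..3 here, so IndexError is impossible
def declarer_scan_py (d : Int) (fs : List Char) (fp fsi : Int) : List (Int × String) → String
  | [] => (PySem.List.pyGet? pvSEATS fsi).getD ""
  | p :: rest =>
    if is_contract_bid_py p.2 && decide (strain_py p.2 = fs) then
      let si := PySem.Int.mod (d + p.1) 4
      if PySem.Int.mod si 2 = fp then (PySem.List.pyGet? pvSEATS si).getD ""
      else declarer_scan_py d fs fp fsi rest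
    else declarer_scan_py d fs fp fsi rest

def compute_declarer_py (dealer : String) (bids : List String) : String :=
  let d_idx := dealer_index_py dealer
  let r := (PySem.List.enumerate bids 0).foldl declarer_step_py (none, none)
  -- 'if final_idx is None or not final_strain: return dealer.upper()'
  match r with
  | (some final_idx, some final_strain) =>
    if final_strain = [] then PySem.Str.upper dealer
    else
      let final_seat_idx := PySem.Int.mod (d_idx + final_idx) 4
      let final_side_parity := PySem.Int.mod final_seat_idx 2
      declarer_scan_py d_idx final_strain final_side_parity final_seat_idx
        (PySem.List.enumerate bids 0)
  | _ => PySem.Str.upper dealer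

-- ===== PORT B =====
-- body of B's single loop: t = tok.upper(); the 'len(t) >= 2' test is the c0 :: c1 :: _ pattern;
-- 'c in <string>' on the single char t[0]/t[1] is exactly List.contains
def declarer_alt_step (d : Int)
    (st : PySem.Dict (Char × Int) Int × Option (Char × Int)) (p : Int × String) :
    PySem.Dict (Char × Int) Int × Option (Char × Int) :=
  match PySem.Chars.upper p.2.toList with
  | c0 :: c1 :: _ =>
    if "1234567".toList.contains c0 && "CDHSN".toList.contains c1 then
      let key := (c1, PySem.Int.mod (d + p.1) 2)
      ((if st.1.contains key then st.1 else st.1.insert key p.1), some key)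
    else st
  | _ => st

def compute_declarer_py_alt (dealer : String) (bids : List String) : String :=
  -- try: SEATS.index(dealer.upper()) except ValueError: 0
  let d_idx : Int :=
    match PySem.List.index? pvSEATS (PySem.Str.upper dealer) with
    | some i => (i : Int)
    | none => 0
  let st := (PySem.List.enumerate bids 0).foldl (declarer_alt_step d_idx)
    (PySem.Dict.empty, none)
  match st.2 with
  | none => PySem.Str.upper dealer
  | some key =>
    -- first_seen[last]: the last key was inserted when first met, so KeyError is impossible
    (PySem.List.pyGet? pvSEATS
      (PySem.Int.mod (d_idx + (st.1.get? key).getD 0) 4)).getD ""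

-- ===== PRECONDITION & SPEC =====
def Spec_compute_declarer_py (dealer : String) (bids : List String) (out : String) : Prop := out = compute_declarer_py_alt dealer bids
instance (dealer : String) (bids : List String) (out : String) : Decidable (Spec_compute_declarer_py dealer bids out) := by unfold Spec_compute_declarer_py; infer_instance

-- ===== CLAIM (what is proved, stated in full; the proofs are below) =====
def Claim_equal_compute_declarer_py : Prop := ∀ (dealer : String) (bids : List String), Dom_compute_declarer_py dealer bids → Spec_compute_declarer_py dealer bids (compute_declarer_py dealer bids)

-- ===== LEMMAS AND PROOFS =====

-- the upper-cased second character of a bid (its strain), total with a junk default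
def pvStrain (tok : String) : Char := (PySem.Chars.upper tok.toList).getD 1 '?'

-- B's dict key of an enumerated bid
def pvKey (d : Int) (p : Int × String) : Char × Int := (pvStrain p.2, PySem.Int.mod (d + p.1) 2)

-- the last contract bid of the (enumerated) list
def pvLastC (l : List (Int × String)) : Option (Int × String) :=
  l.reverse.find? (fun p => is_contract_bid_py p.2)

-- the first contract bid with dict key k
def pvFindP (d : Int) (k : Char × Int) (l : List (Int × String)) : Option (Int × String) :=
  l.find? (fun p => is_contract_bid_py p.2 && (pvKey d p == k))

lemma pv_isIn_singleton (c : Char) (l : List Char) :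
    PySem.Chars.isIn [c] l = l.contains c := by
  apply Bool.eq_iff_iff.mpr
  rw [PySem.Chars.isIn_iff_infix]
  simp [List.singleton_infix_iff]

-- B's inline contract test equals A's helper
lemma pv_test_eq (tok : String) :
    is_contract_bid_py tok =
      (match PySem.Chars.upper tok.toList with
       | c0 :: c1 :: _ => "1234567".toList.contains c0 && "CDHSN".toList.contains c1
       | _ => false) := by
  unfold is_contract_bid_py
  have hup := PySem.Str.toList_upper tok
  rcases hu : PySem.Chars.upper tok.toList with _ | ⟨c0, _ | ⟨c1, rest⟩⟩
  · simp [PySem.Str.len_eq, hup, hu, PySem.List.pyGet?, PySem.List.pyIdx?]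
  · simp [PySem.Str.len_eq, hup, hu, PySem.List.pyGet?, PySem.List.pyIdx?]
  · simp [pv_isIn_singleton, PySem.Str.len_eq, hup, hu,
      PySem.List.pyGet?, PySem.List.pyIdx?,
      show ((2:Int) ≤ (rest.length:Int) + 1 + 1) from by omega,
      show ((0:Int) ≤ (rest.length:Int) + 1) from by omega]

lemma pv_strain_eq (tok : String) (h : is_contract_bid_py tok = true) :
    strain_py tok = [pvStrain tok] := by
  rw [pv_test_eq] at h
  rcases t : tok.toList with _ | ⟨a, _ | ⟨b, r⟩⟩ <;>
    simp [PySem.Chars.upper, t] at h ⊢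
  show strain_py tok = _
  have hb : PySem.Str.pyGet? tok 1 = some b := by
    show PySem.List.pyGet? tok.toList 1 = some b
    simp [t, PySem.List.pyGet?, PySem.List.pyIdx?]
  simp [strain_py, pvStrain, PySem.Chars.upper, t]

-- B's loop body, phrased through A's contract test and the key abstraction
lemma pv_alt_step_eq (d : Int) (st : PySem.Dict (Char × Int) Int × Option (Char × Int))
    (p : Int × String) :
    declarer_alt_step d st p =
      if is_contract_bid_py p.2 then
        ((if st.1.contains (pvKey d p) then st.1 else st.1.insert (pvKey d p) p.1),
          some (pvKey d p))
      else st := by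
  rw [pv_test_eq]
  unfold declarer_alt_step
  rcases hu : PySem.Chars.upper p.2.toList with _ | ⟨c0, _ | ⟨c1, rest⟩⟩ <;>
    simp [pvKey, pvStrain, hu]

lemma pv_foldA (l : List (Int × String)) (st : Option Int × Option (List Char)) :
    l.foldl declarer_step_py st =
      match pvLastC l with
      | some q => (some q.1, some (strain_py q.2))
      | none => st := by
  induction l using List.reverseRecOn generalizing st with
  | nil => simp [pvLastC]
  | append_singleton l p ih =>
    rw [List.foldl_append]
    by_cases h : is_contract_bid_py p.2 <;>
      simp [pvLastC, declarer_step_py, h, ih]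

lemma pv_foldB_snd (d : Int) (l : List (Int × String))
    (st : PySem.Dict (Char × Int) Int × Option (Char × Int)) :
    (l.foldl (declarer_alt_step d) st).2 =
      match pvLastC l with
      | some q => some (pvKey d q)
      | none => st.2 := by
  induction l using List.reverseRecOn generalizing st with
  | nil => simp [pvLastC]
  | append_singleton l p ih =>
    rw [List.foldl_append]
    by_cases h : is_contract_bid_py p.2 <;>
      simp [pvLastC, List.foldl, pv_alt_step_eq, h, ih]

lemma pv_foldB_get (d : Int) (k : Char × Int) (l : List (Int × String))
    (D : PySem.Dict (Char × Int) Int) (last : Option (Char × Int)) :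
    ((l.foldl (declarer_alt_step d) (D, last)).1).get? k =
      (D.get? k).or ((pvFindP d k l).map (·.1)) := by
  induction l generalizing D last with
  | nil => simp [pvFindP]
  | cons p l ih =>
    rw [List.foldl_cons, pv_alt_step_eq]
    by_cases h : is_contract_bid_py p.2
    · simp only [h, if_true]
      by_cases hk : pvKey d p = k
      · rw [hk]
        rcases hc : D.contains k
        · have hn : D.get? k = none := (PySem.Dict.get?_eq_none_iff_contains D k).mpr hc
          simp [ih, PySem.Dict.get?_insert_self, hn, pvFindP, h, hk, Option.some_or]
        · obtain ⟨v, hv⟩ := Option.isSome_iff_exists.mp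
            (by rw [PySem.Dict.contains_eq_isSome_get?] at hc; exact hc)
          simp [ih, hv, pvFindP, h, hk, Option.some_or]
      · have hb : (pvKey d p == k) = false := beq_false_of_ne hk
        have hget : (if D.contains (pvKey d p) then D
            else D.insert (pvKey d p) p.1).get? k = D.get? k := by
          rcases D.contains (pvKey d p)
          · simp [PySem.Dict.get?_insert_of_ne _ _ (Ne.symm hk)]
          · simp
        rw [ih, hget]
        simp [pvFindP, h, hb]
    · simp only [h, Bool.false_eq_true, if_false]
      rw [ih]
      simp [pvFindP, h]

lemma pv_scan (d : Int) (k : Char × Int) (fsi : Int) (l : List (Int × String)) :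
    declarer_scan_py d [k.1] k.2 fsi l =
      match pvFindP d k l with
      | some q => (PySem.List.pyGet? pvSEATS (PySem.Int.mod (d + q.1) 4)).getD ""
      | none => (PySem.List.pyGet? pvSEATS fsi).getD "" := by
  induction l with
  | nil => simp [pvFindP, declarer_scan_py]
  | cons p l ih =>
    unfold declarer_scan_py
    by_cases h : is_contract_bid_py p.2
    · have hs := pv_strain_eq p.2 h
      by_cases h1 : pvStrain p.2 = k.1
      · by_cases h2 : PySem.Int.mod (d + p.1) 2 = k.2
        · have hkey : pvKey d p = k := by
            rw [pvKey, h1, h2]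
          rw [PySem.Int.mod_eq_emod_of_pos (by norm_num)] at h2
          simp [h, hs, h1, pvFindP, hkey]
          exact fun hh => absurd h2 hh
        · have hb : (pvKey d p == k) = false := by
            apply beq_false_of_ne
            intro he
            exact h2 (congrArg Prod.snd he)
          rw [PySem.Int.mod_eq_emod_of_pos (by norm_num)] at h2
          simp [h, hs, h1, pvFindP, hb, ih]
          exact fun hh => absurd hh h2
      · have hb : (pvKey d p == k) = false := by
          apply beq_false_of_ne
          intro he
          exact h1 (congrArg Prod.fst he)
        have hd : (decide (([pvStrain p.2] : List Char) = [k.1])) = false := by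
          simp [h1]
        simp [h, hs, pvFindP, hb, ih]
        exact fun hh => absurd hh h1
    · simp [h, pvFindP, ih]

lemma pv_last_found (d : Int) (l : List (Int × String)) (q : Int × String)
    (h : pvLastC l = some q) : (pvFindP d (pvKey d q) l).isSome := by
  unfold pvLastC at h
  have hq : is_contract_bid_py q.2 = true := by
    have := List.find?_some h
    simpa using this
  have hm : q ∈ l := List.mem_reverse.mp (List.mem_of_find?_eq_some h)
  rw [pvFindP, List.find?_isSome]
  exact ⟨q, hm, by simp [hq]⟩

-- ===== VERDICT (by name: the statement is the Claim_ definition above) =====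
theorem compute_declarer_py_spec : Claim_equal_compute_declarer_py := by
  intro dealer bids _
  show compute_declarer_py dealer bids = compute_declarer_py_alt dealer bids
  simp only [compute_declarer_py, compute_declarer_py_alt]
  rw [show (match PySem.List.index? pvSEATS (PySem.Str.upper dealer) with
      | some i => (i : Int) | none => 0) = dealer_index_py dealer from rfl]
  rw [pv_foldA, pv_foldB_snd]
  rcases hq : pvLastC (PySem.List.enumerate bids 0) with _ | q
  · simp
  · have hc : is_contract_bid_py q.2 = true := by
      unfold pvLastC at hq
      have := List.find?_some hq
      simpa using this
    have hs := pv_strain_eq q.2 hc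
    obtain ⟨q', hq'⟩ := Option.isSome_iff_exists.mp
      (pv_last_found (dealer_index_py dealer) _ q hq)
    have hget := pv_foldB_get (dealer_index_py dealer) (pvKey (dealer_index_py dealer) q)
      (PySem.List.enumerate bids 0) PySem.Dict.empty none
    rw [hq'] at hget
    simp only [hs]
    have hscan := pv_scan (dealer_index_py dealer) (pvKey (dealer_index_py dealer) q)
      (PySem.Int.mod (dealer_index_py dealer + q.1) 4) (PySem.List.enumerate bids 0)
    rw [hq'] at hscan
    simp only [pvKey] at hget hscan
    simp at hget hscan
    simp [hget, hscan, pvKey]
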